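-- pv_equiv track=rewrite | github.com/ITanmayee/codechef | QAQ.py | QAQs
-- ===== SOURCE A (Python) =====
-- def QAQs(word):
--     Qs = [i for i in range(len(word)) if word[i] == 'Q']
--     As = [i for i in range(len(word)) if word[i] == 'A']
--     qaqs = 0
--     for q in Qs:
--         for a in As:
--             if a > q:
--                 qaqs += len([i for i in Qs if i > a])
--
--     return qaqs
-- ===== SOURCE B (Python) =====
-- def QAQs(word):
--     q = qa = qaq = 0
--     for c in word:
--         if c == 'Q':
--             qaq += qa
--             q += 1
--         elif c == 'A':
--             qa += q
--     return qaq
-- ===== Notes on version B (the rewrite author's own statement) =====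
-- stated objective: faster
-- what changed: Replaced the index-list construction with nested loops and a repeated inner filter (cubic) by a single left-to-right pass over the characters accumulating three running prefix-subsequence counters.
import Mathlib
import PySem

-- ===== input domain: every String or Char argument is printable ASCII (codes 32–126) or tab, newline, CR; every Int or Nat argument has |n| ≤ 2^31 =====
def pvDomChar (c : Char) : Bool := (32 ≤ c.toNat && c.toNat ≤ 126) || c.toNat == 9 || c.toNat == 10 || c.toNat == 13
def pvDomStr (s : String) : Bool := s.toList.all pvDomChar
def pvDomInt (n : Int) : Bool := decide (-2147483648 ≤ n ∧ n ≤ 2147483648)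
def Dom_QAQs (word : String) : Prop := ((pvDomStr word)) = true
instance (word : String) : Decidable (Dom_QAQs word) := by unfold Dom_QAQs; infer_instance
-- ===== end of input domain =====

-- B replaces A's index-list nested loops with repeated inner filters by one linear pass accumulating three prefix-subsequence counters (objective: faster).

-- ===== PORT A =====
def QAQs (word : String) : Int :=
  let Qs := (PySem.List.pyRange 0 (PySem.Str.len word) 1).filter
      (fun i => PySem.Str.pyGet? word i == some 'Q')
  let As := (PySem.List.pyRange 0 (PySem.Str.len word) 1).filter
      (fun i => PySem.Str.pyGet? word i == some 'A')
  Qs.foldl (fun qaqs q =>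
    As.foldl (fun qaqs a =>
      if a > q then qaqs + ((Qs.filter (fun i => i > a)).length : Int) else qaqs) qaqs) 0

-- ===== PORT B =====
def QAQs_alt (word : String) : Int :=
  (word.toList.foldl (fun (s : Int × Int × Int) c =>
    if c = 'Q' then (s.1 + 1, s.2.1, s.2.2 + s.2.1)
    else if c = 'A' then (s.1, s.2.1 + s.1, s.2.2)
    else s) (0, 0, 0)).2.2

-- ===== PRECONDITION & SPEC =====
def Spec_QAQs (word : String) (out : Int) : Prop := out = QAQs_alt word
instance (word : String) (out : Int) : Decidable (Spec_QAQs word out) := by unfold Spec_QAQs; infer_instance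

-- ===== CLAIM (what is proved, stated in full; the proofs are below) =====
def Claim_equal_QAQs : Prop := ∀ (word : String), Dom_QAQs word → Spec_QAQs word (QAQs word)

-- ===== LEMMAS AND PROOFS =====

-- the list of indices of l holding the character c0, as A builds it
def pvIdxs (l : List Char) (c0 : Char) : List Int :=
  (PySem.List.pyRange 0 (l.length : Int) 1).filter
      (fun i => PySem.List.pyGet? l i == some c0)

-- A's value as a function of the character list
def pvA (l : List Char) : Int :=
  (pvIdxs l 'Q').foldl (fun qaqs q =>
    (pvIdxs l 'A').foldl (fun qaqs a =>
      if a > q then qaqs + (((pvIdxs l 'Q').filter (fun i => i > a)).length : Int) else qaqs) qaqs) 0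

-- the two auxiliary quantities B's state tracks: number of 'Q's, number of Q-before-A pairs
def pvCQ (l : List Char) : Int := ((pvIdxs l 'Q').length : Int)

def pvCQA (l : List Char) : Int :=
  ((pvIdxs l 'Q').map (fun q => (((pvIdxs l 'A').filter (fun a => a > q)).length : Int))).sum

lemma pvQAQs_eq (word : String) : QAQs word = pvA word.toList := by
  simp [QAQs, pvA, pvIdxs]

lemma pv_mem_idxs_lt {l : List Char} {c0 : Char} {i : Int}
    (h : i ∈ pvIdxs l c0) : 0 ≤ i ∧ i < (l.length : Int) := by
  have := List.mem_filter.mp h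
  exact (PySem.List.mem_pyRange_one).mp this.1

lemma pvIdxs_append (l : List Char) (c c0 : Char) :
    pvIdxs (l ++ [c]) c0 =
      pvIdxs l c0 ++ (if c = c0 then [(l.length : Int)] else []) := by
  unfold pvIdxs
  have hlen : (((l ++ [c]).length : Int)) = (l.length : Int) + 1 := by
    simp
  rw [hlen, PySem.List.pyRange_one_succ_right (by positivity), List.filter_append]
  congr 1
  · apply List.filter_congr
    intro i hi
    have hb := (PySem.List.mem_pyRange_one).mp hi
    have h0 : PySem.List.pyGet? (l ++ [c]) i = PySem.List.pyGet? l i := by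
      rw [PySem.List.pyGet?_of_nonneg _ hb.1, PySem.List.pyGet?_of_nonneg _ hb.1]
      have : i.toNat < l.length := by omega
      exact List.getElem?_append_left this
    rw [h0]
  · by_cases hc : c = c0
    · simp [hc]
    · simp [hc]

lemma pv_foldl_if_add {α : Type} (p : α → Prop) [DecidablePred p] (g : α → Int) :
    ∀ (l : List α) (init : Int),
      l.foldl (fun acc x => if p x then acc + g x else acc) init
        = init + ((l.filter (fun x => decide (p x))).map g).sum := by
  intro l
  induction l with
  | nil => intro init; simp
  | cons x xs ih =>
      intro init
      by_cases h : p x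
      · simp [h, ih]; ring
      · simp [h, ih]

-- A's value, as a sum of sums over the index lists
lemma pvA_sum (l : List Char) :
    pvA l = ((pvIdxs l 'Q').map (fun q =>
      (((pvIdxs l 'A').filter (fun a => decide (a > q))).map
        (fun a => (((pvIdxs l 'Q').filter (fun i => i > a)).length : Int))).sum)).sum := by
  unfold pvA
  simp only [pv_foldl_if_add, PySem.List.foldl_add, zero_add]

lemma pv_filter_gt_append (S : List Int) (n a : Int) (h : a < n) :
    (S ++ [n]).filter (fun i => decide (i > a)) = S.filter (fun i => decide (i > a)) ++ [n] := by
  simp [List.filter_append, h]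

lemma pv_filter_gt_nil (S : List Int) (n : Int) (h : ∀ x ∈ S, x < n) :
    S.filter (fun i => decide (i > n)) = [] := by
  rw [List.filter_eq_nil_iff]
  intro x hx
  simp only [decide_eq_true_eq, gt_iff_lt, not_lt]
  exact le_of_lt (h x hx)

lemma pvCQ_append (l : List Char) (c : Char) :
    pvCQ (l ++ [c]) = pvCQ l + (if c = 'Q' then 1 else 0) := by
  unfold pvCQ
  rw [pvIdxs_append]
  by_cases h : c = 'Q' <;> simp [h]

lemma pvCQA_append (l : List Char) (c : Char) :
    pvCQA (l ++ [c]) = pvCQA l + (if c = 'A' then pvCQ l else 0) := by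
  unfold pvCQA pvCQ
  rw [pvIdxs_append l c 'Q', pvIdxs_append l c 'A']
  by_cases hq : c = 'Q'
  · -- new 'Q' index contributes nothing: no 'A' lies to its right
    subst hq
    simp only [if_neg (show ¬('Q':Char) = 'A' by decide), if_true,
      List.append_nil, List.map_append, List.sum_append,
      List.map_cons, List.map_nil, List.sum_cons, List.sum_nil]
    rw [pv_filter_gt_nil _ _ (fun x hx => (pv_mem_idxs_lt hx).2)]
    simp
  · by_cases ha : c = 'A'
    · -- every existing 'Q' index gains exactly one new 'A' to its right
      subst ha
      simp only [if_neg (show ¬('A':Char) = 'Q' by decide), if_true,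
        List.append_nil]
      rw [List.map_congr_left (g := fun q =>
            (((pvIdxs l 'A').filter (fun a => decide (a > q))).length : Int) + 1)]
      · rw [PySem.List.sum_map_add_int, PySem.List.sum_map_const_int]
        ring
      · intro q hq'
        rw [pv_filter_gt_append _ _ _ (pv_mem_idxs_lt hq').2]
        simp
    · simp [hq, ha]

lemma pvA_append (l : List Char) (c : Char) :
    pvA (l ++ [c]) = pvA l + (if c = 'Q' then pvCQA l else 0) := by
  rw [pvA_sum, pvA_sum, pvIdxs_append l c 'Q', pvIdxs_append l c 'A']
  unfold pvCQA
  by_cases hq : c = 'Q'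
  · subst hq
    simp only [if_neg (show ¬('Q':Char) = 'A' by decide), if_true,
      List.append_nil, List.map_append, List.sum_append,
      List.map_cons, List.map_nil, List.sum_cons, List.sum_nil]
    rw [pv_filter_gt_nil (pvIdxs l 'A') _ (fun x hx => (pv_mem_idxs_lt hx).2)]
    rw [List.map_congr_left (g := fun q =>
          ((((pvIdxs l 'A').filter (fun a => decide (a > q))).map
            (fun a => (((pvIdxs l 'Q').filter (fun i => i > a)).length : Int))).sum
            + (((pvIdxs l 'A').filter (fun a => decide (a > q))).length : Int)))]
    · rw [PySem.List.sum_map_add_int]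
      simp
    · intro q hq'
      rw [List.map_congr_left (g := fun a =>
            ((((pvIdxs l 'Q').filter (fun i => i > a)).length : Int) + 1))]
      · rw [PySem.List.sum_map_add_int, PySem.List.sum_map_const_int]
        ring
      · intro a ha'
        have haA : a ∈ pvIdxs l 'A' := List.mem_of_mem_filter ha'
        rw [pv_filter_gt_append _ _ _ (pv_mem_idxs_lt haA).2]
        simp
  · by_cases ha : c = 'A'
    · subst ha
      simp only [if_neg (show ¬('A':Char) = 'Q' by decide), if_true,
        List.append_nil]
      rw [add_zero]
      apply congrArg
      apply List.map_congr_left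
      intro q hq'
      rw [pv_filter_gt_append _ _ _ (pv_mem_idxs_lt hq').2]
      simp only [List.map_append, List.sum_append, List.map_cons, List.map_nil, List.sum_cons,
        List.sum_nil]
      rw [pv_filter_gt_nil (pvIdxs l 'Q') _ (fun x hx => (pv_mem_idxs_lt hx).2)]
      simp
    · simp [hq, ha]

lemma pv_invariant (l : List Char) :
    l.foldl (fun (s : Int × Int × Int) c =>
      if c = 'Q' then (s.1 + 1, s.2.1, s.2.2 + s.2.1)
      else if c = 'A' then (s.1, s.2.1 + s.1, s.2.2)
      else s) (0, 0, 0) = (pvCQ l, pvCQA l, pvA l) := by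
  induction l using List.reverseRecOn with
  | nil => simp [pvCQ, pvCQA, pvA, pvIdxs]
  | append_singleton xs c ih =>
      rw [List.foldl_append, ih]
      simp only [List.foldl_cons, List.foldl_nil]
      rw [pvCQ_append, pvCQA_append, pvA_append]
      by_cases h1 : c = 'Q'
      · subst h1
        simp
      · by_cases h2 : c = 'A' <;> simp [h1, h2]

-- ===== VERDICT (by name: the statement is the Claim_ definition above) =====
theorem QAQs_spec : Claim_equal_QAQs := by
  intro word _
  unfold Spec_QAQs QAQs_alt
  rw [pvQAQs_eq, pv_invariant]
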